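-- pv_equiv track=rewrite | github.com/msiampou/spam-url-detection | utils.py | count_symbols
-- ===== SOURCE A (Python) =====
-- SYMBOLS = '{}()[],:;+*|<>~$@$%^`%!'
--
-- def count_symbols(token):
--   if len(token) == 0:
--     return -1
--
--   s = 0
--   for ch in token:
--     if ch in SYMBOLS:
--       s+=1
--   return s
-- ===== SOURCE B (Python) =====
-- SYMBOLS = '{}()[],:;+*|<>~$@$%^`%!'
--
-- def count_symbols(token):
--   if len(token) == 0:
--     return -1
--   cnt = {}
--   for ch in token:
--     cnt[ch] = cnt.get(ch, 0) + 1
--   return sum(cnt.get(c, 0) for c in set(SYMBOLS))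
-- ===== Notes on version B (the rewrite author's own statement) =====
-- stated objective: alternative
-- what changed: B builds a frequency table of the token in one pass and then sums the table entries over the deduplicated symbol alphabet, instead of scanning the token and testing each character for membership in the symbol string.
import Mathlib
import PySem

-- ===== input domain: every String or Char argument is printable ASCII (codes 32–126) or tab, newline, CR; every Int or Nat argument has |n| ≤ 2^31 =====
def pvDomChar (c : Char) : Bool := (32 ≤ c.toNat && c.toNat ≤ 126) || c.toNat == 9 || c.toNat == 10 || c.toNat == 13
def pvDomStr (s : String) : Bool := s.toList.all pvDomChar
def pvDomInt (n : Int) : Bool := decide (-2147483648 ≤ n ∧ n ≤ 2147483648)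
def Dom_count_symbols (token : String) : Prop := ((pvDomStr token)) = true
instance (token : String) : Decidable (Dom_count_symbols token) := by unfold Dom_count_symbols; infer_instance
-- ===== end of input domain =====

-- B sums a one-pass frequency table of the token over the deduplicated symbol
-- alphabet instead of scanning the token and testing membership (alternative
-- decomposition, same result).

def pvSymbols : List Char := "{}()[],:;+*|<>~$@$%^`%!".toList

-- ===== PORT A =====
def count_symbols (token : String) : Int :=
  if token.toList.length == 0 then -1
  else
    token.toList.foldl (fun s ch => if pvSymbols.contains ch then s + 1 else s) 0

-- ===== PORT B =====
def count_symbols_alt (token : String) : Int :=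
  if token.toList.length == 0 then -1
  else
    let cnt := token.toList.foldl
      (fun d ch => d.insert ch (d.getD ch 0 + 1)) (PySem.Dict.empty (κ := Char) (ν := Int))
    ((PySem.Set.ofList pvSymbols : List Char).map (fun c => cnt.getD c 0)).sum

-- ===== PRECONDITION & SPEC =====
def Spec_count_symbols (token : String) (out : Int) : Prop := out = count_symbols_alt token
instance (token : String) (out : Int) : Decidable (Spec_count_symbols token out) := by unfold Spec_count_symbols; infer_instance

-- ===== CLAIM (what is proved, stated in full; the proofs are below) =====
def Claim_equal_count_symbols : Prop := ∀ (token : String), Dom_count_symbols token → Spec_count_symbols token (count_symbols token)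

-- ===== LEMMAS AND PROOFS =====

lemma countP_cons_split (l : List Char) (c : Char) (S : List Char) (hc : c ∉ S) :
    l.countP (fun ch => decide (ch ∈ c :: S)) =
      l.count c + l.countP (fun ch => decide (ch ∈ S)) := by
  induction l with
  | nil => simp
  | cons x l ih =>
    rw [List.countP_cons, List.countP_cons, List.count_cons, ih]
    by_cases hx : x = c
    · subst hx
      simp [hc]
      omega
    · by_cases hxs : x ∈ S <;> simp [hx, hxs] <;> omega

lemma sum_counts (l : List Char) (S : List Char) (hS : S.Nodup) :
    (S.map (fun c => (l.count c : Int))).sum =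
      (l.countP (fun ch => decide (ch ∈ S)) : Int) := by
  induction S with
  | nil => simp
  | cons c S ih =>
    rcases List.nodup_cons.mp hS with ⟨hc, hS'⟩
    simp only [List.map_cons, List.sum_cons, ih hS']
    rw [countP_cons_split l c S hc]
    push_cast
    ring

-- ===== VERDICT (by name: the statement is the Claim_ definition above) =====
theorem count_symbols_spec : Claim_equal_count_symbols := by
  intro token _
  unfold Spec_count_symbols count_symbols count_symbols_alt
  split_ifs
  · rfl
  · rw [PySem.List.foldl_if_add_one, zero_add]
    have hmap : ∀ c : Char,
        ((token.toList.foldl (fun d ch => d.insert ch (d.getD ch 0 + 1))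
            (PySem.Dict.empty (κ := Char) (ν := Int))).getD c 0) =
          (token.toList.count c : Int) := by
      intro c
      rw [PySem.Dict.getD_foldl_insert_add_one]
      simp [PySem.Dict.getD_empty]
    simp only [hmap]
    rw [sum_counts token.toList (PySem.Set.ofList pvSymbols) (PySem.Set.nodup_ofList _)]
    congr 1
    refine List.countP_congr ?_
    intro ch _
    simp [PySem.Set.mem_ofList]
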